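-- pv_equiv track=rewrite | github.com/galact-byte/Web | Work/Program1/app/services/reporting.py | _split_rows
-- ===== SOURCE A (Python) =====
-- def _split_rows(table_seg: str) -> list[str]:
--     rows: list[str] = []
--     idx = 0
--     while True:
--         start = table_seg.find("<w:tr", idx)
--         if start == -1:
--             break
--         close = table_seg.find("</w:tr>", start)
--         if close == -1:
--             break
--         end = close + len("</w:tr>")
--         rows.append(table_seg[start:end])
--         idx = end
--     return rows
-- ===== SOURCE B (Python) =====
-- import re
--
-- def _split_rows(table_seg: str) -> list[str]:
--     # One non-overlapping left-to-right regex pass; the non-greedy .*? with DOTALL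
--     # takes each "<w:tr" opening to the first following "</w:tr>".
--     return re.findall(r"<w:tr.*?</w:tr>", table_seg, flags=re.DOTALL)
-- ===== Notes on version B (the rewrite author's own statement) =====
-- stated objective: idiomatic
-- what changed: Replaces the manual find/index while-loop with a single non-overlapping regex pass: re.findall(r"<w:tr.*?</w:tr>", table_seg, re.DOTALL); no index variable or explicit loop is maintained.
import Mathlib
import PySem

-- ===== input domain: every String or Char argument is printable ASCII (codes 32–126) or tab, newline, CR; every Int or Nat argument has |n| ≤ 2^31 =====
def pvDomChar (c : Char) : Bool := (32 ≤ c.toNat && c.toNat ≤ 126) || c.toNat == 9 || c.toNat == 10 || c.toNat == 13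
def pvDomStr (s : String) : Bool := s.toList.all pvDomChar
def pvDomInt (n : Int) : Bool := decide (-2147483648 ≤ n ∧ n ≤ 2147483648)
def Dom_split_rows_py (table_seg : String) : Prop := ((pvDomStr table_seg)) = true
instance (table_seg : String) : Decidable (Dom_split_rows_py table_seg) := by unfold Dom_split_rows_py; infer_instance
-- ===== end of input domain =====

-- B replaces A's manual find/index while-loop by a single non-overlapping regex pass
-- (re.findall(r"<w:tr.*?</w:tr>", table_seg, re.DOTALL)); same return value, objective: idiomatic.

-- ===== PORT A =====
-- A's `while True:` loop, with fuel: each iteration advances idx by at least 7, so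
-- `len + 1` units of fuel are never exhausted (used only to justify termination).
def splitRowsPyLoop (s : String) (fuel : Nat) (idx : Int) (rows : List String) : List String :=
  match fuel with
  | 0 => rows
  | fuel' + 1 =>
    let start := PySem.Str.findFrom s "<w:tr" idx none
    if start = -1 then rows
    else
      let close := PySem.Str.findFrom s "</w:tr>" start none
      if close = -1 then rows
      else
        let e := close + 7      -- close + len("</w:tr>")
        splitRowsPyLoop s fuel' e (rows ++ [PySem.Str.slice s (some start) (some e)])

def split_rows_py (table_seg : String) : List String :=
  splitRowsPyLoop table_seg ((PySem.Str.len table_seg).toNat + 1) 0 []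

-- ===== PORT B =====
-- Hand port of re.findall(r"<w:tr.*?</w:tr>", s, re.DOTALL): scan left to right; at each
-- position try to match the pattern (literal "<w:tr", then lazily consume up to the first
-- "</w:tr>"); on a match emit it and resume after it, on failure advance one character.
-- Exact for this pattern: `.` with DOTALL matches any character, `.*?` takes the shortest extension.
def pvOpenTag : List Char := ['<', 'w', ':', 't', 'r']
def pvCloseTag : List Char := ['<', '/', 'w', ':', 't', 'r', '>']

-- lazy `.*?</w:tr>` part: consumed chars (close tag included) and the remainder
def pvRowClose : List Char → Option (List Char × List Char)
  | [] => none
  | c :: rest =>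
    if pvCloseTag.isPrefixOf (c :: rest) then some (pvCloseTag, (c :: rest).drop 7)
    else
      match pvRowClose rest with
      | some (mid, r) => some (c :: mid, r)
      | none => none

-- needed by pvFindallRows for termination
theorem pvRowClose_length : ∀ {l mid r : List Char}, pvRowClose l = some (mid, r) → r.length < l.length := by
  intro l
  induction l with
  | nil => intro mid r h; simp [pvRowClose] at h
  | cons c rest ih =>
    intro mid r h
    simp only [pvRowClose] at h
    split at h
    · simp at h
      obtain ⟨-, hr⟩ := h
      subst hr
      simp
    · cases hrc : pvRowClose rest with
      | none => rw [hrc] at h; simp at h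
      | some p =>
        rw [hrc] at h
        obtain ⟨mid', r'⟩ := p
        simp at h
        obtain ⟨-, hr⟩ := h
        subst hr
        have := ih hrc
        simp
        omega

def pvFindallRows : List Char → List (List Char)
  | [] => []
  | c :: rest =>
    if pvOpenTag.isPrefixOf (c :: rest) then
      match h : pvRowClose ((c :: rest).drop 5) with
      | some (mid, r) => (pvOpenTag ++ mid) :: pvFindallRows r
      | none => pvFindallRows rest
    else pvFindallRows rest
termination_by l => l.length
decreasing_by
  · have := pvRowClose_length h
    simp at this ⊢
    omega
  · simp
  · simp

def split_rows_py_alt (table_seg : String) : List String :=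
  (pvFindallRows table_seg.toList).map String.ofList

-- ===== PRECONDITION & SPEC =====
def Spec_split_rows_py (table_seg : String) (out : List String) : Prop := out = split_rows_py_alt table_seg
instance (table_seg : String) (out : List String) : Decidable (Spec_split_rows_py table_seg out) := by unfold Spec_split_rows_py; infer_instance

-- ===== CLAIM (what is proved, stated in full; the proofs are below) =====
def Claim_equal_split_rows_py : Prop := ∀ (table_seg : String), Dom_split_rows_py table_seg → Spec_split_rows_py table_seg (split_rows_py table_seg)

-- ===== LEMMAS AND PROOFS =====

theorem pvOpenTag_toList : "<w:tr".toList = pvOpenTag := by decide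

theorem pvCloseTag_toList : "</w:tr>".toList = pvCloseTag := by decide

theorem pv_infix_of_drop {l t : List Char} {n : Nat} (h : l <:+: t.drop n) : l <:+: t :=
  h.trans (List.drop_suffix n t).isInfix

theorem pv_no_open_findall : ∀ {t : List Char}, ¬ pvOpenTag <:+: t → pvFindallRows t = [] := by
  intro t
  induction t with
  | nil => intro _; rw [pvFindallRows]
  | cons c rest ih =>
    intro h
    rw [pvFindallRows]
    rw [if_neg (fun hpre => h (List.isPrefixOf_iff_prefix.mp hpre).isInfix)]
    exact ih (fun hi => h (List.infix_cons hi))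

theorem pv_rowClose_none : ∀ {u : List Char}, ¬ pvCloseTag <:+: u → pvRowClose u = none := by
  intro u
  induction u with
  | nil => intro _; rfl
  | cons c rest ih =>
    intro h
    rw [pvRowClose]
    rw [if_neg (fun hpre => h (List.isPrefixOf_iff_prefix.mp hpre).isInfix)]
    rw [ih (fun hi => h (List.infix_cons hi))]

theorem pv_no_close_findall : ∀ {t : List Char}, ¬ pvCloseTag <:+: t → pvFindallRows t = [] := by
  intro t
  induction t with
  | nil => intro _; rw [pvFindallRows]
  | cons c rest ih =>
    intro h
    have hrest : ¬ pvCloseTag <:+: rest := fun hi => h (List.infix_cons hi)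
    rw [pvFindallRows]
    split
    · rw [pv_rowClose_none (u := (c :: rest).drop 5) (fun hi => h (pv_infix_of_drop hi))]
      exact ih hrest
    · exact ih hrest

theorem pv_findall_skip : ∀ (p : Nat) {t : List Char},
    (∀ i < p, ¬ pvOpenTag <+: t.drop i) → pvFindallRows t = pvFindallRows (t.drop p) := by
  intro p
  induction p with
  | zero => intro t _; rw [List.drop_zero]
  | succ p ih =>
    intro t h
    cases t with
    | nil => simp
    | cons c rest =>
      have h0 : ¬ pvOpenTag <+: (c :: rest) := by
        have := h 0 (by omega)
        simpa using this
      rw [pvFindallRows, if_neg (fun hpre => h0 (List.isPrefixOf_iff_prefix.mp hpre))]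
      rw [List.drop_succ_cons]
      exact ih (fun i hi => by
        have := h (i + 1) (by omega)
        simpa using this)

theorem pv_rowClose_some : ∀ (m : Nat) {u : List Char}, pvCloseTag <+: u.drop m →
    (∀ i < m, ¬ pvCloseTag <+: u.drop i) →
    pvRowClose u = some (u.take m ++ pvCloseTag, u.drop (m + 7)) := by
  intro m
  induction m with
  | zero =>
    intro u h1 _
    rw [List.drop_zero] at h1
    cases u with
    | nil => simp [pvCloseTag] at h1
    | cons c rest =>
      rw [pvRowClose, if_pos (List.isPrefixOf_iff_prefix.mpr h1)]
      simp
  | succ m ih =>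
    intro u h1 h2
    cases u with
    | nil => simp [pvCloseTag] at h1
    | cons c rest =>
      have h0 : ¬ pvCloseTag <+: (c :: rest) := by
        have := h2 0 (by omega)
        simpa using this
      rw [pvRowClose, if_neg (fun hpre => h0 (List.isPrefixOf_iff_prefix.mp hpre))]
      rw [List.drop_succ_cons] at h1
      rw [ih h1 (fun i hi => by
        have := h2 (i + 1) (by omega)
        simpa using this)]
      simp [List.take_succ_cons, List.drop_succ_cons]

-- one matched row: an opening tag at the head of u, first closing tag at offset qn
theorem pv_findall_match {u : List Char} {qn : Nat} (hopen : pvOpenTag <+: u)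
    (hq1 : pvCloseTag <+: u.drop qn) (hq2 : ∀ i < qn, ¬ pvCloseTag <+: u.drop i) :
    pvFindallRows u = u.take (qn + 7) :: pvFindallRows (u.drop (qn + 7)) := by
  obtain ⟨w, hw⟩ := hopen
  subst hw
  -- the first five characters are "<w:tr", so the closing tag starts at qn ≥ 5
  have hqn5 : 5 ≤ qn := by
    by_contra hlt
    interval_cases qn <;>
      simp [pvOpenTag, pvCloseTag, List.cons_prefix_cons] at hq1
  obtain ⟨m, hm⟩ : ∃ m, qn = 5 + m := ⟨qn - 5, by omega⟩
  subst hm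
  have hdrop : ∀ j : Nat, (pvOpenTag ++ w).drop (5 + j) = w.drop j := by
    intro j
    rw [← List.drop_drop]
    rfl
  have htake5 : ∀ n : Nat, (pvOpenTag ++ w).take (5 + n) = pvOpenTag ++ w.take n := by
    intro n
    rw [List.take_add]
    rfl
  rw [hdrop] at hq1
  have hmin : ∀ i < m, ¬ pvCloseTag <+: w.drop i := by
    intro i hi
    have := hq2 (5 + i) (by omega)
    rwa [hdrop] at this
  have hrc : pvRowClose w = some (w.take m ++ pvCloseTag, w.drop (m + 7)) :=
    pv_rowClose_some m hq1 hmin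
  have htake : (pvOpenTag ++ w).take (5 + m + 7) = pvOpenTag ++ (w.take m ++ pvCloseTag) := by
    have h7 : (w.drop m).take 7 = pvCloseTag := (List.prefix_iff_eq_take.mp hq1).symm
    rw [show 5 + m + 7 = 5 + (m + 7) by omega, htake5, List.take_add, h7]
  have hdropr : (pvOpenTag ++ w).drop (5 + m + 7) = w.drop (m + 7) := by
    rw [show 5 + m + 7 = 5 + (m + 7) by omega, hdrop]
  have hu : pvOpenTag ++ w = '<' :: 'w' :: ':' :: 't' :: 'r' :: w := rfl
  rw [htake, hdropr] at *
  rw [hu, pvFindallRows]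
  rw [if_pos (by rw [← hu]; exact List.isPrefixOf_iff_prefix.mpr ⟨w, rfl⟩)]
  have hdrop5 : ('<' :: 'w' :: ':' :: 't' :: 'r' :: w).drop 5 = w := rfl
  rw [hdrop5]
  split
  · rename_i mid r heq
    rw [hrc] at heq
    obtain ⟨hmid, hr⟩ := Prod.mk.inj (Option.some.inj heq)
    rw [← hmid, ← hr]
  · rename_i heq
    rw [hrc] at heq
    exact absurd heq (by simp)

-- no closing tag after the first opening tag: no match at all
theorem pv_findall_open_no_close {u : List Char} (hopen : pvOpenTag <+: u)
    (hnc : ¬ pvCloseTag <:+: u) : pvFindallRows u = [] := by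
  obtain ⟨w, hw⟩ := hopen
  subst hw
  have hu : pvOpenTag ++ w = '<' :: 'w' :: ':' :: 't' :: 'r' :: w := rfl
  rw [hu] at hnc ⊢
  rw [pvFindallRows]
  rw [if_pos (by rw [← hu]; exact List.isPrefixOf_iff_prefix.mpr ⟨w, rfl⟩)]
  split
  · rename_i mid r heq
    rw [pv_rowClose_none (u := ('<' :: 'w' :: ':' :: 't' :: 'r' :: w).drop 5)
      (fun hi => hnc (pv_infix_of_drop hi))] at heq
    exact absurd heq (by simp)
  · exact pv_no_close_findall (fun hi => hnc (List.infix_cons hi))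

-- one unfolding step of A's loop, with the local lets expanded
theorem splitRowsPyLoop_succ (s : String) (fuel : Nat) (idx : Int) (rows : List String) :
    splitRowsPyLoop s (fuel + 1) idx rows =
      if PySem.Str.findFrom s "<w:tr" idx none = -1 then rows
      else if PySem.Str.findFrom s "</w:tr>" (PySem.Str.findFrom s "<w:tr" idx none) none = -1 then rows
      else splitRowsPyLoop s fuel (PySem.Str.findFrom s "</w:tr>" (PySem.Str.findFrom s "<w:tr" idx none) none + 7)
        (rows ++ [PySem.Str.slice s (some (PySem.Str.findFrom s "<w:tr" idx none))
          (some (PySem.Str.findFrom s "</w:tr>" (PySem.Str.findFrom s "<w:tr" idx none) none + 7))]) := rfl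

-- main loop invariant: A's loop from index k computes B's scan of the suffix s[k:]
theorem pv_loop_eq (s : String) : ∀ (fuel k : Nat) (rows : List String),
    k ≤ s.toList.length → s.toList.length - k < fuel →
    splitRowsPyLoop s fuel (k : Int) rows
      = rows ++ (pvFindallRows (s.toList.drop k)).map String.ofList := by
  intro fuel
  induction fuel with
  | zero => intro k rows hk hf; omega
  | succ fuel ih =>
    intro k rows hk hf
    have hfind : PySem.Str.findFrom s "<w:tr" (k : Int) none
        = if PySem.Chars.find (s.toList.drop k) pvOpenTag = -1 then -1
          else (k : Int) + PySem.Chars.find (s.toList.drop k) pvOpenTag := by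
      have := PySem.Chars.findFrom_natCast s.toList "<w:tr".toList k hk
      simp only [pysem, pvOpenTag_toList] at this ⊢
      exact this
    by_cases hopen : PySem.Chars.find (s.toList.drop k) pvOpenTag = -1
    · have hfind' : PySem.Str.findFrom s "<w:tr" (k : Int) none = -1 := by
        rw [hfind, if_pos hopen]
      rw [splitRowsPyLoop_succ, hfind', if_pos rfl]
      rw [pv_no_open_findall ((PySem.Chars.find_eq_neg_one_iff _ _).mp hopen)]
      simp
    · -- an opening tag was found at absolute index k + pn
      have hp0 : 0 ≤ PySem.Chars.find (s.toList.drop k) pvOpenTag := by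
        have := PySem.Chars.neg_one_le_find (s.toList.drop k) pvOpenTag
        omega
      obtain ⟨hp1, hp2⟩ := PySem.Chars.find_spec (s := s.toList.drop k) (sub := pvOpenTag) hp0
      generalize hpg : (PySem.Chars.find (s.toList.drop k) pvOpenTag).toNat = pn at hp1 hp2
      have hpcast : PySem.Chars.find (s.toList.drop k) pvOpenTag = (pn : Int) := by omega
      rw [List.drop_drop] at hp1
      have hkp : k + pn + 5 ≤ s.toList.length := by
        have hle := hp1.length_le
        rw [show pvOpenTag.length = 5 from rfl, List.length_drop] at hle
        omega
      have hfind1' : PySem.Str.findFrom s "<w:tr" (k : Int) none = ((k + pn : Nat) : Int) := by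
        rw [hfind, if_neg hopen, hpcast]
        push_cast
        ring
      have hfind2 : PySem.Str.findFrom s "</w:tr>" ((k + pn : Nat) : Int) none
          = if PySem.Chars.find (s.toList.drop (k + pn)) pvCloseTag = -1 then -1
            else ((k + pn : Nat) : Int) + PySem.Chars.find (s.toList.drop (k + pn)) pvCloseTag := by
        have := PySem.Chars.findFrom_natCast s.toList "</w:tr>".toList (k + pn) (by omega)
        simp only [pysem, pvCloseTag_toList] at this ⊢
        exact this
      by_cases hclose : PySem.Chars.find (s.toList.drop (k + pn)) pvCloseTag = -1
      · have hfind2' : PySem.Str.findFrom s "</w:tr>" ((k + pn : Nat) : Int) none = -1 := by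
          rw [hfind2, if_pos hclose]
        rw [splitRowsPyLoop_succ, hfind1', if_neg (by omega), hfind2', if_pos rfl]
        rw [pv_findall_skip pn hp2, List.drop_drop]
        rw [pv_findall_open_no_close hp1 ((PySem.Chars.find_eq_neg_one_iff _ _).mp hclose)]
        simp
      · -- a closing tag was found at absolute index k + pn + qn
        have hq0 : 0 ≤ PySem.Chars.find (s.toList.drop (k + pn)) pvCloseTag := by
          have := PySem.Chars.neg_one_le_find (s.toList.drop (k + pn)) pvCloseTag
          omega
        obtain ⟨hq1, hq2⟩ := PySem.Chars.find_spec (s := s.toList.drop (k + pn)) (sub := pvCloseTag) hq0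
        generalize hqg : (PySem.Chars.find (s.toList.drop (k + pn)) pvCloseTag).toNat = qn at hq1 hq2
        have hqcast : PySem.Chars.find (s.toList.drop (k + pn)) pvCloseTag = (qn : Int) := by omega
        have hklen : k + pn + qn + 7 ≤ s.toList.length := by
          have hle := hq1.length_le
          rw [show pvCloseTag.length = 7 from rfl, List.length_drop, List.length_drop] at hle
          omega
        have hfind2' : PySem.Str.findFrom s "</w:tr>" ((k + pn : Nat) : Int) none
            = ((k + pn + qn : Nat) : Int) := by
          rw [hfind2, if_neg hclose, hqcast]
          push_cast
          ring
        have hend : ((k + pn + qn : Nat) : Int) + 7 = ((k + pn + qn + 7 : Nat) : Int) := by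
          push_cast
          ring
        rw [splitRowsPyLoop_succ, hfind1', if_neg (by omega), hfind2', if_neg (by omega), hend]
        have hslice : PySem.Str.slice s (some ((k + pn : Nat) : Int)) (some ((k + pn + qn + 7 : Nat) : Int))
            = String.ofList ((s.toList.drop (k + pn)).take (qn + 7)) := by
          apply String.toList_inj.mp
          have hb : k + pn + qn + 7 - (k + pn) = qn + 7 := by omega
          simp only [pysem, hb]
          simp
        rw [hslice, ih (k + pn + qn + 7) _ (by omega) (by omega)]
        rw [pv_findall_skip pn hp2, List.drop_drop]
        rw [pv_findall_match hp1 hq1 hq2]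
        have hrem : (s.toList.drop (k + pn)).drop (qn + 7) = s.toList.drop (k + pn + qn + 7) := by
          rw [List.drop_drop, show k + pn + (qn + 7) = k + pn + qn + 7 from by omega]
        rw [hrem]
        simp

-- ===== VERDICT (by name: the statement is the Claim_ definition above) =====
theorem split_rows_py_spec : Claim_equal_split_rows_py := by
  intro s _
  unfold Spec_split_rows_py split_rows_py split_rows_py_alt
  have hlen : PySem.Str.len s = (s.toList.length : Int) := by simp [pysem]
  have h := pv_loop_eq s ((PySem.Str.len s).toNat + 1) 0 [] (by omega) (by omega)
  simpa using h
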